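-- pv_equiv track=rewrite | github.com/algha/tarim | tarim/app/core/utils/helper.py | str2arr
-- ===== SOURCE A (Python) =====
-- def str2arr(str):
--     if '.' not in str:
--         return str
--     arr = str.split('.')
--     _str = arr[0]
--     for item in arr[1:]:
--         _str = _str + '[{}]'.format(item)
--     return _str
-- ===== SOURCE B (Python) =====
-- def str2arr(str):
--     # Single left-to-right character scan: a '.' opens a bracket segment,
--     # closing the previous one if open; no split list is built.
--     out = []
--     opened = False
--     for c in str:
--         if c == '.':
--             if opened:
--                 out.append(']')
--             out.append('[')
--             opened = True
--         else:
--             out.append(c)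
--     if opened:
--         out.append(']')
--     return ''.join(out)
-- ===== Notes on version B (the rewrite author's own statement) =====
-- stated objective: alternative
-- what changed: Replaces split-into-list-then-concatenate with a single character scan that opens a bracket at each dot, closing any bracket still open, and closes the last one at the end, building no intermediate segment list.
import Mathlib
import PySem

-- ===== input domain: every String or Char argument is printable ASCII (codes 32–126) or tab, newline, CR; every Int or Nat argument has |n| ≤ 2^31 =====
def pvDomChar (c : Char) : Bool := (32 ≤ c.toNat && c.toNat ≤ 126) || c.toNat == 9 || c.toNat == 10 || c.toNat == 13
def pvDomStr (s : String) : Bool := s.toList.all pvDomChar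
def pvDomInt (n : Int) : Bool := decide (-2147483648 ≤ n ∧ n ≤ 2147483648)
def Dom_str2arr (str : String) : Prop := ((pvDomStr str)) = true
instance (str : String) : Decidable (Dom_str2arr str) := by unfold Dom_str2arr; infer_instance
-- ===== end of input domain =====

-- B replaces split-then-concatenate with a single character scan (no intermediate segment list); alternative, same cost.

-- ===== PORT A =====
-- if '.' not in str: return str; arr = str.split('.'); _str = arr[0]; for item in arr[1:]: _str += '[' + item + ']'
def str2arr (str : String) : String :=
  if PySem.Chars.isIn ['.'] str.toList then
    match PySem.Chars.splitOn str.toList ['.'] with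
    | [] => ""  -- unreachable: split always returns at least one piece
    | h :: t => String.ofList (t.foldl (fun acc item => acc ++ ('[' :: (item ++ [']']))) h)
  else str

-- ===== PORT B =====
-- one scan: '.' closes any open bracket and opens a new one; close at the end
def pvStepB (st : List Char × Bool) (c : Char) : List Char × Bool :=
  if c = '.' then ((if st.2 then st.1 ++ [']'] else st.1) ++ ['['], true)
  else (st.1 ++ [c], st.2)

def pvFinishB (p : List Char × Bool) : List Char :=
  if p.2 then p.1 ++ [']'] else p.1

def str2arr_alt (str : String) : String :=
  String.ofList (pvFinishB (str.toList.foldl pvStepB ([], false)))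

-- ===== PRECONDITION & SPEC =====
def Spec_str2arr (str : String) (out : String) : Prop := out = str2arr_alt str
instance (str : String) (out : String) : Decidable (Spec_str2arr str out) := by unfold Spec_str2arr; infer_instance

-- ===== CLAIM (what is proved, stated in full; the proofs are below) =====
def Claim_equal_str2arr : Prop := ∀ (str : String), Dom_str2arr str → Spec_str2arr str (str2arr str)

-- ===== LEMMAS AND PROOFS =====

-- gBr cs: the rendering of cs while inside an open bracket (close it at each dot / at the end)
def gBr : List Char → List Char
  | [] => [']']
  | c :: r => if c = '.' then ']' :: '[' :: gBr r else c :: gBr r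

-- fBr cs: the rendering of cs with no bracket open yet
def fBr : List Char → List Char
  | [] => []
  | c :: r => if c = '.' then '[' :: gBr r else c :: fBr r

-- reference form of split('.') with an explicit current-segment accumulator
def split1 : List Char → List Char → List (List Char)
  | cur, [] => [cur]
  | cur, c :: r => if c = '.' then cur :: split1 [] r else split1 (cur ++ [c]) r

theorem split1_ne_nil (cs cur : List Char) : split1 cur cs ≠ [] := by
  induction cs generalizing cur with
  | nil => simp [split1]
  | cons c r ih => simp only [split1]; split_ifs <;> simp [ih]

theorem go_eq_split1 (fuel : Nat) (l cur : List Char) (acc : List (List Char))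
    (h : l.length ≤ fuel) :
    PySem.Chars.splitOn.go ['.'] fuel l cur acc = acc.reverse ++ split1 cur.reverse l := by
  induction fuel generalizing l cur acc with
  | zero =>
    have : l = [] := by cases l <;> simp_all
    subst this
    rw [PySem.Chars.splitOn.go.eq_def]
    dsimp only
    simp only [split1]
    simp
  | succ n ih =>
    cases l with
    | nil =>
      rw [PySem.Chars.splitOn.go.eq_def]
      simp [split1]
    | cons c rest =>
      rw [PySem.Chars.splitOn.go.eq_def]
      dsimp only
      by_cases hc : c = '.'
      · subst hc
        rw [if_pos (by simp [List.isPrefixOf])]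
        rw [show List.drop ['.'].length ('.' :: rest) = rest from rfl]
        rw [ih rest [] (cur.reverse :: acc) (by simp at h; omega)]
        simp [split1]
      · rw [if_neg (by simp [List.isPrefixOf, Ne.symm hc])]
        rw [ih rest (c :: cur) acc (by simp at h; omega)]
        simp [split1, hc]

theorem splitOn_eq_split1 (cs : List Char) :
    PySem.Chars.splitOn cs ['.'] = split1 [] cs := by
  have := go_eq_split1 (cs.length + 1) cs [] [] (by omega)
  simpa [PySem.Chars.splitOn] using this

def wrapBr (s : List Char) : List Char := '[' :: (s ++ [']'])

-- inside an open bracket: joining the split of cs renders cur ++ gBr cs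
theorem split1_gBr (cs cur : List Char) :
    (split1 cur cs).headD [] ++ [']'] ++ ((split1 cur cs).tail.map wrapBr).flatten
      = cur ++ gBr cs := by
  induction cs generalizing cur with
  | nil => simp [split1, gBr]
  | cons c r ih =>
    by_cases hc : c = '.'
    · subst hc
      have hne := split1_ne_nil r []
      obtain ⟨h, t, ht⟩ := List.exists_cons_of_ne_nil hne
      have h2 := ih ([] : List Char)
      rw [ht] at h2
      simp only [List.headD_cons, List.tail_cons, List.nil_append] at h2
      simp only [split1, ht, gBr]
      simp [wrapBr, ← h2]
    · simp only [split1, gBr, if_neg hc]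
      rw [ih (cur ++ [c])]
      simp

-- no bracket open: joining the split of cs renders cur ++ fBr cs
theorem split1_fBr (cs cur : List Char) :
    (split1 cur cs).headD [] ++ ((split1 cur cs).tail.map wrapBr).flatten
      = cur ++ fBr cs := by
  induction cs generalizing cur with
  | nil => simp [split1, fBr]
  | cons c r ih =>
    by_cases hc : c = '.'
    · subst hc
      have hne := split1_ne_nil r []
      obtain ⟨h, t, ht⟩ := List.exists_cons_of_ne_nil hne
      have h2 := split1_gBr r ([] : List Char)
      rw [ht] at h2
      simp only [List.headD_cons, List.tail_cons, List.nil_append] at h2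
      simp only [split1, ht, fBr]
      simp [wrapBr, ← h2]
    · simp only [split1, fBr, if_neg hc]
      rw [ih (cur ++ [c])]
      simp

theorem fBr_no_dot (cs : List Char) (h : '.' ∉ cs) : fBr cs = cs := by
  induction cs with
  | nil => rfl
  | cons c r ih =>
    simp only [List.mem_cons, not_or] at h
    simp [fBr, Ne.symm h.1, ih h.2]

-- B's fold computes fBr / gBr depending on the open-bracket flag
theorem foldB_eq (cs acc : List Char) (b : Bool) :
    pvFinishB (cs.foldl pvStepB (acc, b)) = acc ++ (if b then gBr cs else fBr cs) := by
  induction cs generalizing acc b with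
  | nil => cases b <;> simp [pvFinishB, gBr, fBr]
  | cons c r ih =>
    by_cases hc : c = '.'
    · subst hc
      simp only [List.foldl_cons, pvStepB]
      rw [ih]
      cases b <;> simp [gBr, fBr]
    · simp only [List.foldl_cons, pvStepB, if_neg hc]
      rw [ih]
      cases b <;> simp [gBr, fBr, hc]

theorem str2arr_alt_eq_fBr (str : String) :
    str2arr_alt str = String.ofList (fBr str.toList) := by
  unfold str2arr_alt
  rw [foldB_eq str.toList [] false]
  simp

theorem mem_of_isIn (cs : List Char) :
    PySem.Chars.isIn ['.'] cs = true ↔ '.' ∈ cs := by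
  rw [PySem.Chars.isIn_iff_infix]
  constructor
  · intro h; exact h.mem (by simp)
  · intro h; obtain ⟨a, b, rfl⟩ := List.append_of_mem h; exact ⟨a, b, by simp⟩

-- ===== VERDICT (by name: the statement is the Claim_ definition above) =====
theorem str2arr_spec : Claim_equal_str2arr := by
  intro str _
  unfold Spec_str2arr
  rw [str2arr_alt_eq_fBr]
  unfold str2arr
  by_cases hd : PySem.Chars.isIn ['.'] str.toList = true
  · rw [if_pos hd, splitOn_eq_split1]
    have hne := split1_ne_nil str.toList []
    obtain ⟨h, t, ht⟩ := List.exists_cons_of_ne_nil hne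
    rw [ht]
    dsimp only
    have hf := split1_fBr str.toList ([] : List Char)
    rw [ht] at hf
    simp only [List.headD_cons, List.tail_cons, List.nil_append] at hf
    rw [PySem.List.foldl_append_eq_flatMap (fun item => '[' :: (item ++ [']'])) t h]
    have : List.flatMap (fun item => '[' :: (item ++ [']'])) t = (t.map wrapBr).flatten := by
      rw [List.flatMap_def]
      rfl
    rw [this, hf]
  · rw [if_neg hd]
    have hmem : '.' ∉ str.toList := by
      intro hm
      exact hd ((mem_of_isIn str.toList).mpr hm)
    rw [fBr_no_dot _ hmem]
    simp
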